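-- pv_equiv track=rewrite | github.com/Kyuber1007/problemsolving | programmers/과일장수.py | solution
-- ===== SOURCE A (Python) =====
-- def solution(k, m, score):
--     answer = 0
--     score.sort(reverse=True)
--     idx = m-1
--     for i in range(len(score)//m):
--         tem = score[idx]
--         answer += tem * m
--         idx += m
--     return answer
-- ===== SOURCE B (Python) =====
-- def solution(k, m, score):
--     # Count multiplicities once, then walk the DISTINCT values in descending
--     # order: a run of c copies of value v occupies positions [pos, pos+c) of the
--     # descending ranking, and v is a box minimum exactly at positions i with
--     # (i+1) divisible by m inside the sellable prefix of length (n//m)*m, so its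
--     # contribution is v*m*(nxt//m - pos//m).  With m <= 0 no box can be formed.
--     if m <= 0:
--         return 0
--     cnt = {}
--     for v in score:
--         cnt[v] = cnt.get(v, 0) + 1
--     sellable = (len(score) // m) * m
--     total = 0
--     pos = 0
--     for v in sorted(cnt, reverse=True):
--         if pos >= sellable:
--             break
--         nxt = min(pos + cnt[v], sellable)
--         total += v * (nxt // m - pos // m) * m
--         pos += cnt[v]
--     return total
-- ===== Notes on version B (the rewrite author's own statement) =====
-- stated objective: alternative
-- what changed: B never builds or indexes the sorted score list: it counts multiplicities in a dict, sorts only the DISTINCT values descending, and for each value computes its total contribution arithmetically from its run interval [pos, pos+count) via nxt//m - pos//m (the number of group-minimum positions it covers), O(n + u log u) for u distinct values instead of A's full sort plus per-group indexing; for m <= 0 no box can be formed and B returns 0 (A returns 0 for m < 0 and raises for m = 0).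
import Mathlib
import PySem

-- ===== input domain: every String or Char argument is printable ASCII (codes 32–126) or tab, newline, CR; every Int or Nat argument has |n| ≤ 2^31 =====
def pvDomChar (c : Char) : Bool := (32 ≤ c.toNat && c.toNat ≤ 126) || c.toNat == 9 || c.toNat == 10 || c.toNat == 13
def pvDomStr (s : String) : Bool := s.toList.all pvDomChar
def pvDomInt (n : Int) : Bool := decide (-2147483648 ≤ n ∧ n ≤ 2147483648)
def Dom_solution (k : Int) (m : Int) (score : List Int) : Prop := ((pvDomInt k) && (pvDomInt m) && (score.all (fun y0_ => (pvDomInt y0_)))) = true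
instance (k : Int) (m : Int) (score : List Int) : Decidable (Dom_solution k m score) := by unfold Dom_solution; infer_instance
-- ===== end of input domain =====

-- B replaces A's full sort + per-group indexing by a multiplicity dict and run-length
-- arithmetic over the sorted DISTINCT values (for m ≤ 0 no box can be formed, B returns 0);
-- A sorts `score` in place (a side effect B does not have) — the equivalence is about the return value.

-- ===== PORT A =====
-- literal port of A: sort descending, then loop len//m times picking score[idx], idx starting at m-1, stepping by m
def solution (k : Int) (m : Int) (score : List Int) : Int :=
  let s := PySem.List.sorted score (fun x => x) true
  let st := (PySem.List.pyRange 0 (PySem.Int.floordiv (s.length : Int) m) 1).foldl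
      (fun (st : Int × Int) _ => (st.1 + PySem.List.pyGetD s st.2 0 * m, st.2 + m)) (0, m - 1)
  st.1

-- ===== PORT B =====
-- B's loop over the distinct values with early exit ('break' when pos >= sellable)
def pvGo (cnt : PySem.Dict Int Int) (m : Int) (sellable : Int) :
    List Int → Int → Int → Int
  | [], _, total => total
  | v :: rest, pos, total =>
    if sellable ≤ pos then total
    else
      pvGo cnt m sellable rest (pos + cnt.getD v 0)
        (total + v * (PySem.Int.floordiv (min (pos + cnt.getD v 0) sellable) m
                      - PySem.Int.floordiv pos m) * m)

-- literal port of B: multiplicity dict, distinct values sorted descending, arithmetic contribution per run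
def solution_alt (k : Int) (m : Int) (score : List Int) : Int :=
  if m ≤ 0 then 0
  else
    let cnt := score.foldl (fun d v => d.insert v (d.getD v 0 + 1)) PySem.Dict.empty
    let sellable := PySem.Int.floordiv (score.length : Int) m * m
    pvGo cnt m sellable (PySem.List.sorted cnt.keys (fun x => x) true) 0 0

-- ===== PRECONDITION & SPEC =====
-- Pre_ excludes only m = 0, on which A raises ZeroDivisionError (len(score)//m).
def Pre_solution (k : Int) (m : Int) (score : List Int) : Prop := m ≠ 0
instance (k : Int) (m : Int) (score : List Int) : Decidable (Pre_solution k m score) := by unfold Pre_solution; infer_instance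
def pvWitness_solution : Int × Int × List Int := (5, 2, [4, 1, 3, 2])

def Spec_solution (k : Int) (m : Int) (score : List Int) (out : Int) : Prop := out = solution_alt k m score
instance (k : Int) (m : Int) (score : List Int) (out : Int) : Decidable (Spec_solution k m score out) := by unfold Spec_solution; infer_instance

-- ===== CLAIM (what is proved, stated in full; the proofs are below) =====
def Claim_equal_solution : Prop := ∀ (k : Int) (m : Int) (score : List Int), Dom_solution k m score → Pre_solution k m score → Spec_solution k m score (solution k m score)

-- ===== LEMMAS AND PROOFS =====

-- the common value both programs compute: m times the sum of the descending ranking d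
-- at the positions i with (i+1) divisible by mn, over the index window [a, b)
def pvF (d : List Int) (m : Int) (mn a b : ℕ) : Int :=
  ∑ i ∈ Finset.Ico a b, (if (i + 1) % mn = 0 then d.getD i 0 * m else 0)

-- A's index loop
lemma loopA (s : List Int) (m : Int) (q : Nat) (a0 i0 : Int) :
    ((PySem.List.pyRange 0 (q : Int) 1).foldl
      (fun (st : Int × Int) _ => (st.1 + PySem.List.pyGetD s st.2 0 * m, st.2 + m)) (a0, i0))
    = (a0 + (∑ j ∈ Finset.range q, PySem.List.pyGetD s (i0 + (j : Int) * m) 0) * m, i0 + (q : Int) * m) := by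
  induction q generalizing a0 i0 with
  | zero => simp [PySem.List.pyRange_one_eq_nil]
  | succ q ih =>
    have h1 : ((q + 1 : Nat) : Int) = (q : Int) + 1 := by push_cast; ring
    rw [h1, PySem.List.pyRange_one_succ_right (by positivity), List.foldl_append, ih]
    simp [Finset.sum_range_succ]
    constructor
    · ring
    · ring

-- only i = t*mn + (mn-1) contributes inside the block [t*mn, t*mn + mn)
lemma blockF (d : List Int) (m : Int) (mn : ℕ) (hmn : 1 ≤ mn) (t : ℕ) :
    pvF d m mn (t * mn) (t * mn + mn) = d.getD (t * mn + (mn - 1)) 0 * m := by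
  unfold pvF
  rw [Finset.sum_eq_single_of_mem (t * mn + (mn - 1))]
  · rw [if_pos]
    have : t * mn + (mn - 1) + 1 = (t + 1) * mn := by cases mn with | zero => omega | succ mm => ring_nf; omega
    rw [this, Nat.mul_mod_left]
  · simp [Finset.mem_Ico]; omega
  · intro i hi hne
    rw [if_neg]
    intro hdvd
    simp [Finset.mem_Ico] at hi
    have hd : mn ∣ i + 1 := Nat.dvd_of_mod_eq_zero hdvd
    obtain ⟨cc, hcc⟩ := hd
    have h1 : t < cc := by
      have : t * mn < mn * cc := by omega
      nlinarith
    have h2 : cc ≤ t + 1 := by nlinarith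
    have hcc2 : cc = t + 1 := by omega
    subst hcc2
    have e : mn * (t + 1) = t * mn + mn := by ring
    rw [e] at hcc
    omega

-- A-side sum equals pvF over the sellable window
lemma sumA (d : List Int) (m : Int) (mn : ℕ) (hmn : 1 ≤ mn) (q : ℕ) :
    ∑ j ∈ Finset.range q, d.getD (mn - 1 + j * mn) 0 * m = pvF d m mn 0 (q * mn) := by
  induction q with
  | zero => simp [pvF]
  | succ q ih =>
    rw [Finset.sum_range_succ, ih]
    have hsplit : pvF d m mn 0 ((q + 1) * mn) = pvF d m mn 0 (q * mn) + pvF d m mn (q * mn) (q * mn + mn) := by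
      unfold pvF
      have e : (q + 1) * mn = q * mn + mn := by ring
      rw [e, ← Finset.sum_Ico_consecutive _ (Nat.zero_le (q * mn)) (by omega : q * mn ≤ q * mn + mn)]
    rw [hsplit, blockF d m mn hmn q]
    have e2 : mn - 1 + q * mn = q * mn + (mn - 1) := by omega
    rw [e2]

-- pvF over a window on which d is constantly v
lemma constF (d : List Int) (m : Int) (mn : ℕ) (v : Int) (a b : ℕ)
    (hab : a ≤ b) (hv : ∀ i, a ≤ i → i < b → d.getD i 0 = v) :
    pvF d m mn a b = v * (((b / mn : ℕ) : Int) - ((a / mn : ℕ) : Int)) * m := by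
  induction b, hab using Nat.le_induction with
  | base => simp [pvF]
  | succ b hab ih =>
    unfold pvF
    rw [Finset.sum_Ico_succ_top hab]
    have hb : d.getD b 0 = v := hv b hab (by omega)
    have ihe := ih (fun i h1 h2 => hv i h1 (by omega))
    unfold pvF at ihe
    rw [ihe, hb]
    have hsd : (b + 1) / mn = b / mn + if mn ∣ b + 1 then 1 else 0 := Nat.succ_div
    by_cases hdvd : mn ∣ b + 1
    · rw [if_pos (Nat.mod_eq_zero_of_dvd hdvd), hsd, if_pos hdvd]
      push_cast
      ring
    · rw [if_neg (fun h => hdvd (Nat.dvd_of_mod_eq_zero h)), hsd, if_neg hdvd]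
      push_cast
      ring

-- count of an expansion of distinct keys by multiplicities
lemma count_expand (ks : List Int) (hnd : ks.Nodup) (c : Int → ℕ) (w : Int) :
    (ks.flatMap (fun v => List.replicate (c v) v)).count w = if w ∈ ks then c w else 0 := by
  induction ks with
  | nil => simp
  | cons v ks ih =>
    simp only [List.flatMap_cons, List.count_append, List.nodup_cons] at *
    rw [ih hnd.2, List.count_replicate]
    by_cases hw : w = v
    · subst hw
      simp [hnd.1]
    · simp [hw, Ne.symm hw]

-- the expansion of a strictly descending key list is weakly descending
lemma pairwise_expand (ks : List Int) (c : Int → ℕ)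
    (h : ks.Pairwise (fun a b => b < a)) :
    (ks.flatMap (fun v => List.replicate (c v) v)).Pairwise (fun a b : Int => b ≤ a) := by
  induction ks with
  | nil => simp
  | cons v ks ih =>
    simp only [List.flatMap_cons]
    rw [List.pairwise_append]
    refine ⟨List.pairwise_replicate.mpr (Or.inr le_rfl), ih h.of_cons, ?_⟩
    intro x hx y hy
    obtain ⟨w, hw, hyw⟩ := List.mem_flatMap.mp hy
    rw [List.eq_of_mem_replicate hx, List.eq_of_mem_replicate hyw]
    exact le_of_lt (List.rel_of_pairwise_cons h hw)

-- the expansion of the descending distinct values by their multiplicities IS the descending sort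
lemma expand_eq (score : List Int) :
    (PySem.List.sorted (PySem.Set.ofList score) (fun x => x) true).flatMap
      (fun v => List.replicate (score.count v) v)
    = PySem.List.sorted score (fun x => x) true := by
  set ks := PySem.List.sorted (PySem.Set.ofList score) (fun x => x) true with hks
  have hperm : ks.Perm (PySem.Set.ofList score) := PySem.List.sorted_perm _ _ _
  have hnd : ks.Nodup := hperm.symm.nodup (PySem.Set.nodup_ofList score)
  have hpw : ks.Pairwise (fun a b : Int => b < a) := by
    have h1 := PySem.List.sorted_pairwise_rev (PySem.Set.ofList score) (fun x : Int => x)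
    have h2 : ks.Pairwise (fun a b : Int => a ≠ b) := hnd
    exact (h1.and h2).imp (fun h => lt_of_le_of_ne h.1 (fun e => h.2 e.symm))
  have hpermE : (ks.flatMap (fun v => List.replicate (score.count v) v)).Perm score := by
    rw [List.perm_iff_count]
    intro w
    rw [count_expand ks hnd (fun v => score.count v) w]
    have hmem : w ∈ ks ↔ w ∈ score := by
      rw [hks, PySem.List.mem_sorted, PySem.Set.mem_ofList]
    by_cases hw : w ∈ score
    · rw [if_pos (hmem.mpr hw)]
    · rw [if_neg (fun h => hw (hmem.mp h)), List.count_eq_zero.mpr hw]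
  apply List.Perm.eq_of_pairwise (le := fun a b : Int => b ≤ a)
  · exact fun a b _ _ x y => le_antisymm y x
  · exact pairwise_expand ks _ hpw
  · exact PySem.List.sorted_pairwise_rev score (fun x : Int => x)
  · exact hpermE.trans (PySem.List.sorted_perm score (fun x : Int => x) true).symm

-- reading d inside a prefix of its drop
lemma getD_of_prefix_drop (d l : List Int) (p j : ℕ) (h : l <+: d.drop p) (hj : j < l.length) :
    d.getD (p + j) 0 = l.getD j 0 := by
  obtain ⟨t, ht⟩ := h
  have hlen : l.length + t.length = d.length - p := by
    have := congrArg List.length ht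
    simpa [List.length_drop] using this
  have hpj : p + j < d.length := by
    have hp : p ≤ d.length := by
      by_contra hc
      have : d.drop p = [] := List.drop_eq_nil_of_le (by omega)
      rw [this] at ht
      have := congrArg List.length ht
      simp at this
      omega
    omega
  rw [List.getD_eq_getElem d 0 hpj, List.getD_eq_getElem l 0 hj]
  have : d[p + j] = (d.drop p)[j]'(by rw [List.length_drop]; omega) := by
    rw [List.getElem_drop]
  rw [this]
  have : (d.drop p)[j]'(by rw [List.length_drop]; omega) = (l ++ t)[j]'(by simp; omega) := by
    congr 1
    exact ht.symm
  rw [this, List.getElem_append_left hj]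

-- B's loop invariant
lemma pvGo_eq (m : Int) (hm : 0 < m) (cnt : PySem.Dict Int Int) (c : Int → ℕ)
    (SN : ℕ) (d : List Int) (ks : List Int) (p : ℕ) (tot : Int)
    (hc : ∀ v ∈ ks, cnt.getD v 0 = (c v : Int))
    (hd : (ks.flatMap (fun v => List.replicate (c v) v)) <+: d.drop p)
    (hSN : SN ≤ p + (ks.flatMap (fun v => List.replicate (c v) v)).length) :
    pvGo cnt m (SN : Int) ks (p : Int) tot = tot + pvF d m m.toNat p SN := by
  have hmn : 1 ≤ m.toNat := by omega
  have hm' : ((m.toNat : ℕ) : Int) = m := Int.toNat_of_nonneg (le_of_lt hm)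
  induction ks generalizing p tot with
  | nil =>
    simp only [List.flatMap_nil, List.length_nil, Nat.add_zero] at hSN
    have : pvF d m m.toNat p SN = 0 := by
      unfold pvF
      rw [Finset.Ico_eq_empty (by omega)]
      simp
    simp [pvGo, this]
  | cons v ks ih =>
    by_cases hbr : SN ≤ p
    · have hbr' : (SN : Int) ≤ (p : Int) := by exact_mod_cast hbr
      have : pvF d m m.toNat p SN = 0 := by
        unfold pvF
        rw [Finset.Ico_eq_empty (by omega)]
        simp
      simp [pvGo, hbr', this]
    · have hbr' : ¬ ((SN : Int) ≤ (p : Int)) := by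
        simp only [Nat.cast_le]; omega
      have hcv : cnt.getD v 0 = (c v : Int) := hc v (List.mem_cons_self)
      -- prefix facts
      simp only [List.flatMap_cons] at hd hSN
      have hdv : List.replicate (c v) v <+: d.drop p :=
        (List.prefix_append _ _).trans hd
      -- values on the run
      have hval : ∀ i, p ≤ i → i < p + c v → d.getD i 0 = v := by
        intro i h1 h2
        have hj : i - p < (List.replicate (c v) v).length := by simp; omega
        have := getD_of_prefix_drop d _ p (i - p) hdv hj
        rw [(by omega : p + (i - p) = i)] at this
        rw [this, List.getD_eq_getElem _ 0 hj, List.getElem_replicate]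
      -- prefix for the tail
      have hd' : (ks.flatMap (fun v => List.replicate (c v) v)) <+: d.drop (p + c v) := by
        obtain ⟨t, ht⟩ := hd
        refine ⟨t, ?_⟩
        have : d.drop (p + c v) = (d.drop p).drop (c v) := by
          rw [List.drop_drop, Nat.add_comm]
        rw [this, ← ht]
        simp
      have hSN' : SN ≤ (p + c v) + (ks.flatMap (fun v => List.replicate (c v) v)).length := by
        simp at hSN ⊢
        omega
      -- unfold one step of pvGo
      have hcast : (p : Int) + cnt.getD v 0 = ((p + c v : ℕ) : Int) := by
        rw [hcv]; push_cast; ring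
      rw [pvGo, if_neg hbr', hcast, ih _ _ (fun w hw => hc w (List.mem_cons_of_mem v hw)) hd' hSN']
      -- arithmetic: the contribution of this run
      have hmincast : min (((p + c v : ℕ) : Int)) ((SN : ℕ) : Int) = ((min (p + c v) SN : ℕ) : Int) := by
        simp [Nat.cast_min]
      have hfd : ∀ x : ℕ, PySem.Int.floordiv ((x : ℕ) : Int) m = ((x / m.toNat : ℕ) : Int) := by
        intro x
        conv_lhs => rw [← hm']
        rw [PySem.Int.floordiv_natCast]
      rw [hmincast, hfd, hfd]
      have hsplit : pvF d m m.toNat p SN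
          = v * (((min (p + c v) SN / m.toNat : ℕ) : Int) - ((p / m.toNat : ℕ) : Int)) * m
            + pvF d m m.toNat (p + c v) SN := by
        by_cases hle : p + c v ≤ SN
        · have e1 : min (p + c v) SN = p + c v := by omega
          rw [e1]
          have : pvF d m m.toNat p SN = pvF d m m.toNat p (p + c v) + pvF d m m.toNat (p + c v) SN := by
            unfold pvF
            rw [Finset.sum_Ico_consecutive _ (by omega : p ≤ p + c v) hle]
          rw [this, constF d m m.toNat v p (p + c v) (by omega) hval]
        · have e1 : min (p + c v) SN = SN := by omega
          rw [e1]
          have h0 : pvF d m m.toNat (p + c v) SN = 0 := by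
            unfold pvF
            rw [Finset.Ico_eq_empty (by omega)]
            simp
          rw [h0, constF d m m.toNat v p SN (by omega) (fun i h1 h2 => hval i h1 (by omega))]
          ring
      rw [hsplit]
      ring

lemma solution_eq_alt (k m : Int) (score : List Int) (hm : m ≠ 0) :
    solution k m score = solution_alt k m score := by
  simp only [solution, solution_alt]
  set desc := PySem.List.sorted score (fun x => x) true with hdesc
  have hlen : desc.length = score.length := PySem.List.length_sorted _ _ _
  rcases lt_or_gt_of_ne hm with hneg | hpos
  · -- m < 0 : both sides are 0
    rw [if_pos (le_of_lt hneg)]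
    have hq : PySem.Int.floordiv (desc.length : Int) m ≤ 0 := by
      have h1 := PySem.Int.floordiv_mul_add_mod (desc.length : Int) m
      have h2 := PySem.Int.mod_neg_bounds (a := (desc.length : Int)) (b := m) hneg
      nlinarith [Int.natCast_nonneg desc.length]
    rw [PySem.List.pyRange_one_eq_nil hq]
    simp
  · -- 0 < m
    rw [if_neg (by omega)]
    have hmn : 1 ≤ m.toNat := by omega
    have hm' : ((m.toNat : ℕ) : Int) = m := Int.toNat_of_nonneg (le_of_lt hpos)
    set mn := m.toNat with hmndef
    set n := score.length with hn
    set q := n / mn with hq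
    -- A side
    have hfd : PySem.Int.floordiv (n : Int) m = (q : Int) := by
      conv_lhs => rw [← hm']
      rw [PySem.Int.floordiv_natCast]
    rw [hlen, hfd, loopA]
    -- counter facts
    have hcnt : score.foldl (fun d v => d.insert v (d.getD v 0 + 1)) PySem.Dict.empty
        = PySem.Dict.counter score := PySem.Dict.foldl_insert_getD_add_one_eq_counter score
    rw [hcnt, PySem.Dict.keys_counter]
    -- sellable = q * mn as a cast
    have hsell : (q : Int) * m = ((q * mn : ℕ) : Int) := by
      rw [← hm']
      push_cast
      ring
    rw [hsell]
    -- B side via the loop invariant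
    have hB := pvGo_eq m hpos (PySem.Dict.counter score) (fun v => score.count v)
      (q * mn) desc (PySem.List.sorted (PySem.Set.ofList score) (fun x => x) true) 0 0
      (fun v _ => PySem.Dict.getD_counter score v)
      (by rw [expand_eq score, List.drop_zero])
      (by
        have : ((PySem.List.sorted (PySem.Set.ofList score) (fun x => x) true).flatMap
            (fun v => List.replicate (score.count v) v)).length = n := by
          rw [expand_eq score, hlen]
        rw [this]
        have : q * mn ≤ n := Nat.div_mul_le_self n mn
        omega)
    rw [Nat.cast_zero] at hB
    rw [hB, zero_add]
    -- A's sum equals pvF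
    simp only [zero_add]
    rw [Finset.sum_mul]
    rw [← sumA desc m mn hmn q]
    apply Finset.sum_congr rfl
    intro j hj
    have hidx : m - 1 + (j : Int) * m = ((mn - 1 + j * mn : ℕ) : Int) := by
      rw [← hm']
      push_cast [hmn]
      ring
    rw [hidx, PySem.List.pyGetD_natCast]

-- ===== VERDICT (by name: the statement is the Claim_ definition above) =====
theorem solution_spec : Claim_equal_solution := by
  intro k m score _ hm
  exact solution_eq_alt k m score hm
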